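-- pv_equiv track=rewrite | github.com/akx/advent-of-code-2017 | 2017/day3lib.py | walk_coordinates
-- ===== SOURCE A (Python) =====
-- def walk_coordinates(steps, x=0, y=0):
--     yield (x, y)
--     for step in steps:
--         if step == 'r':
--             x += 1
--         elif step == 'u':
--             y -= 1
--         elif step == 'l':
--             x -= 1
--         elif step == 'd':
--             y += 1
--         else:
--             raise NotImplementedError('...')
--         yield (x, y)
-- ===== SOURCE B (Python) =====
-- DELTAS = {'r': (1, 0), 'u': (0, -1), 'l': (-1, 0), 'd': (0, 1)}
--
--
-- def walk_coordinates(steps, x=0, y=0):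
--     # Recursive generator: yield the current position, then delegate the rest
--     # of the walk to a recursive call on the tail, shifted by the step's delta.
--     yield (x, y)
--     if steps:
--         try:
--             dx, dy = DELTAS[steps[0]]
--         except KeyError:
--             raise NotImplementedError('...')
--         yield from walk_coordinates(steps[1:], x + dx, y + dy)
-- ===== Notes on version B (the rewrite author's own statement) =====
-- stated objective: alternative
-- what changed: Replaces the mutate-and-yield loop with an if/elif chain by a recursive generator that looks each step up in a delta table and delegates the rest of the walk to a recursive call on the tail; no x/y state is mutated.
import Mathlib
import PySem

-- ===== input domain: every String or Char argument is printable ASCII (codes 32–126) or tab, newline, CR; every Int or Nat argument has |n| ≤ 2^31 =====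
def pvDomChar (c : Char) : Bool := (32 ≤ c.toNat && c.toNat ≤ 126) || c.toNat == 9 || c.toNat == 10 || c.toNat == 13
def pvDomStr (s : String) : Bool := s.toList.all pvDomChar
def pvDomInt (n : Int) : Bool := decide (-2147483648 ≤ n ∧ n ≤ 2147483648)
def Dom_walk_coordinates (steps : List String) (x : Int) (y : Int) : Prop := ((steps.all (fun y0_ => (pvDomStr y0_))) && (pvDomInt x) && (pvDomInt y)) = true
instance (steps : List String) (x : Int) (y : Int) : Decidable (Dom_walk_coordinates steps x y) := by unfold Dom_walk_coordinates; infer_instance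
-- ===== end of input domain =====

-- B replaces A's if/elif mutate-and-yield loop by a recursive generator driven by a delta table; same yields, same raise point.
-- ===== PORT A =====
-- the loop body of A: yields one pair per step, updating (x, y); stops at the raise point
def walkA : List String → Int → Int → List (Int × Int)
  | [], _, _ => []
  | step :: rest, x, y =>
    if step = "r" then ((x + 1), y) :: walkA rest (x + 1) y
    else if step = "u" then (x, (y - 1)) :: walkA rest x (y - 1)
    else if step = "l" then ((x - 1), y) :: walkA rest (x - 1) y
    else if step = "d" then (x, (y + 1)) :: walkA rest x (y + 1)
    else []  -- Python raises NotImplementedError here; outside Pre_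

def walk_coordinates (steps : List String) (x : Int) (y : Int) : List (Int × Int) :=
  (x, y) :: walkA steps x y

-- ===== PORT B =====
def pvDELTAS : PySem.Dict String (Int × Int) :=
  PySem.Dict.ofList [("r", ((1 : Int), (0 : Int))), ("u", (0, -1)), ("l", (-1, 0)), ("d", (0, 1))]

def walk_coordinates_alt (steps : List String) (x : Int) (y : Int) : List (Int × Int) :=
  (x, y) ::
    match steps with
    | [] => []
    | step :: rest =>
      match PySem.Dict.get? pvDELTAS step with
      | some (dx, dy) => walk_coordinates_alt rest (x + dx) (y + dy)
      | none => []  -- Python raises NotImplementedError here; outside Pre_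

-- ===== PRECONDITION & SPEC =====
-- Pre_: the generator raises NotImplementedError on any step outside {r,u,l,d}
def Pre_walk_coordinates (steps : List String) (x : Int) (y : Int) : Prop :=
  ∀ s ∈ steps, s = "r" ∨ s = "u" ∨ s = "l" ∨ s = "d"
instance (steps : List String) (x : Int) (y : Int) : Decidable (Pre_walk_coordinates steps x y) := by unfold Pre_walk_coordinates; infer_instance
def pvWitness_walk_coordinates : List String × Int × Int := (["r", "u", "l", "d", "d"], 3, -2)

def Spec_walk_coordinates (steps : List String) (x : Int) (y : Int) (out : List (Int × Int)) : Prop := out = walk_coordinates_alt steps x y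
instance (steps : List String) (x : Int) (y : Int) (out : List (Int × Int)) : Decidable (Spec_walk_coordinates steps x y out) := by unfold Spec_walk_coordinates; infer_instance

-- ===== CLAIM (what is proved, stated in full; the proofs are below) =====
def Claim_equal_walk_coordinates : Prop := ∀ (steps : List String) (x : Int) (y : Int), Dom_walk_coordinates steps x y → Pre_walk_coordinates steps x y → Spec_walk_coordinates steps x y (walk_coordinates steps x y)

-- ===== LEMMAS AND PROOFS =====

-- ===== VERDICT (by name: the statement is the Claim_ definition above) =====
theorem walkA_eq_alt (steps : List String) (x y : Int)
    (h : ∀ s ∈ steps, s = "r" ∨ s = "u" ∨ s = "l" ∨ s = "d") :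
    (x, y) :: walkA steps x y = walk_coordinates_alt steps x y := by
  induction steps generalizing x y with
  | nil => simp [walkA, walk_coordinates_alt]
  | cons step rest ih =>
    have hstep := h step (List.mem_cons_self ..)
    have hrest : ∀ s ∈ rest, s = "r" ∨ s = "u" ∨ s = "l" ∨ s = "d" :=
      fun s hs => h s (List.mem_cons_of_mem _ hs)
    have hr : pvDELTAS.get? "r" = some (1, 0) := by decide
    have hu : pvDELTAS.get? "u" = some (0, -1) := by decide
    have hl : pvDELTAS.get? "l" = some (-1, 0) := by decide
    have hd : pvDELTAS.get? "d" = some (0, 1) := by decide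
    rcases hstep with rfl | rfl | rfl | rfl <;>
      simp [walkA, walk_coordinates_alt, hr, hu, hl, hd, ih _ _ hrest] <;> ring_nf

theorem walk_coordinates_spec : Claim_equal_walk_coordinates := by
  intro steps x y _ hpre
  unfold Spec_walk_coordinates walk_coordinates
  exact walkA_eq_alt steps x y hpre
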